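-- pv_equiv track=rewrite | github.com/sKy9-99-9/robot-camp-group-girlies-n-amir | challenge_day2/station5.py | solution_station_5
-- ===== SOURCE A (Python) =====
-- def solution_station_5(name):
--     # Create dictionary for LT
--     lt_groups = {
--         1: ["Daeho", "David", "Kaisa", "Oliver", "Sara", "Dan", "Ivar", "Lotte",
--             "Riya", "Vassil", "Twan", "Ester", "Karolina", "Lena", "Margarita",
--             "Anna", "Kien", "Klaudia", "Maliah", "Todd"],
--         2: ["Oumaima", "Mathilde", "Marie", "Anita", "Ziyan", "Bernardo", "Eleanor",
--             "Lorijn", "Maria", "Younes", "Yvan", "Henning", "Liangyu", "Maciej",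
--             "Toprak", "Chris", "GengXin", "Mingze", "Phoebe"],
--         3: ["Betija", "Haider", "Kacper", "Sophie", "Amir", "Baltasar", "Isar", "Jelle",
--             "Nicolas", "David", "Ipek", "Juan", "Marfa", "Maria", "Alissa", "Leopoldo",
--             "Mies", "Jiaying", "Kaixin", "Mai", "Sem", "Tibbe"],
--         4: ["Justus", "Julia", "Philip", "Uli", "Vanessa", "Anna", "Ekaterina",
--             "Thessa", "Tongfei", "Yang", "Benedikt", "Jan", "Nadee", "Osjah",
--             "Tim", "Eliana", "Joana", "Peilin", "Pija", "Wenhao"],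
--         5: ["Afua", "Cristina", "Greta", "Jace", "Laura", "Anna", "Bassant",
--             "Ivan", "Juriaan", "Kiavash"],
--         6: ["Keitaro", "Nohemi", "Norina", "Yifan", "Yinan", "Luo", "Nikola",
--             "Olesya", "Sophie", "Tom"]
--     }
--
--     # Reverse the mapping- name input returns number output
--     name_to_lt = {n: lt for lt, names in lt_groups.items() for n in names}
--
--     # Return LT number
--     return name_to_lt.get(name)
-- ===== SOURCE B (Python) =====
-- def solution_station_5(name):
--     # Compact table: each group is one whitespace-separated string; scan in
--     # order and keep the LAST group containing the name (matches A's
--     # dict-overwrite behaviour for duplicate names).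
--     groups = [
--         "Daeho David Kaisa Oliver Sara Dan Ivar Lotte Riya Vassil Twan Ester "
--         "Karolina Lena Margarita Anna Kien Klaudia Maliah Todd",
--         "Oumaima Mathilde Marie Anita Ziyan Bernardo Eleanor Lorijn Maria Younes "
--         "Yvan Henning Liangyu Maciej Toprak Chris GengXin Mingze Phoebe",
--         "Betija Haider Kacper Sophie Amir Baltasar Isar Jelle Nicolas David Ipek "
--         "Juan Marfa Maria Alissa Leopoldo Mies Jiaying Kaixin Mai Sem Tibbe",
--         "Justus Julia Philip Uli Vanessa Anna Ekaterina Thessa Tongfei Yang "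
--         "Benedikt Jan Nadee Osjah Tim Eliana Joana Peilin Pija Wenhao",
--         "Afua Cristina Greta Jace Laura Anna Bassant Ivan Juriaan Kiavash",
--         "Keitaro Nohemi Norina Yifan Yinan Luo Nikola Olesya Sophie Tom",
--     ]
--     result = None
--     for lt, g in enumerate(groups, 1):
--         if name in g.split():
--             result = lt
--     return result
-- ===== Notes on version B (the rewrite author's own statement) =====
-- stated objective: simpler
-- what changed: B drops the reversed name->group dictionary and the per-group name lists: the table is six whitespace-separated strings, and a single scan over enumerate(groups, 1) keeps the last group whose split contains the name (reproducing dict-overwrite order for duplicate names).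
import Mathlib
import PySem

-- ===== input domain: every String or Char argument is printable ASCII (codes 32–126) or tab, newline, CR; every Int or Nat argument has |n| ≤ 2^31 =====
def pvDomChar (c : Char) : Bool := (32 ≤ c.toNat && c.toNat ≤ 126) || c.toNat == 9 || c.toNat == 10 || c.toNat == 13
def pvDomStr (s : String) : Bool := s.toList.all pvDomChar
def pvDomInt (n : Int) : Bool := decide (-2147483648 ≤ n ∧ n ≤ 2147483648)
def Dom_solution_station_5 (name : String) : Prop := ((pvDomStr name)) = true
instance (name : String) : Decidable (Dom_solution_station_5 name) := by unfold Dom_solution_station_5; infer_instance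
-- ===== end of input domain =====

-- B replaces A's reversed name->group dictionary and per-group name lists by six
-- whitespace-separated strings scanned once, keeping the last match (objective: simpler).

-- ===== PORT A =====
-- A's constant table: {1: [names...], ..., 6: [names...]}
def ltGroups : List (Int × List String) :=
  [ (1, ["Daeho", "David", "Kaisa", "Oliver", "Sara", "Dan", "Ivar", "Lotte",
         "Riya", "Vassil", "Twan", "Ester", "Karolina", "Lena", "Margarita",
         "Anna", "Kien", "Klaudia", "Maliah", "Todd"]),
    (2, ["Oumaima", "Mathilde", "Marie", "Anita", "Ziyan", "Bernardo", "Eleanor",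
         "Lorijn", "Maria", "Younes", "Yvan", "Henning", "Liangyu", "Maciej",
         "Toprak", "Chris", "GengXin", "Mingze", "Phoebe"]),
    (3, ["Betija", "Haider", "Kacper", "Sophie", "Amir", "Baltasar", "Isar", "Jelle",
         "Nicolas", "David", "Ipek", "Juan", "Marfa", "Maria", "Alissa", "Leopoldo",
         "Mies", "Jiaying", "Kaixin", "Mai", "Sem", "Tibbe"]),
    (4, ["Justus", "Julia", "Philip", "Uli", "Vanessa", "Anna", "Ekaterina",
         "Thessa", "Tongfei", "Yang", "Benedikt", "Jan", "Nadee", "Osjah",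
         "Tim", "Eliana", "Joana", "Peilin", "Pija", "Wenhao"]),
    (5, ["Afua", "Cristina", "Greta", "Jace", "Laura", "Anna", "Bassant",
         "Ivan", "Juriaan", "Kiavash"]),
    (6, ["Keitaro", "Nohemi", "Norina", "Yifan", "Yinan", "Luo", "Nikola",
         "Olesya", "Sophie", "Tom"]) ]

-- A builds {n: lt for lt, names in lt_groups.items() for n in names}
-- (later duplicates overwrite earlier ones), then returns name_to_lt.get(name).
def solution_station_5 (name : String) : Option Int :=
  let name_to_lt : PySem.Dict String Int :=
    ltGroups.foldl
      (fun d p => p.2.foldl (fun d n => d.insert n p.1) d)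
      PySem.Dict.empty
  name_to_lt.get? name

-- ===== PORT B =====
-- B's constant table: six whitespace-separated group strings
def groupStrings : List String :=
  [ "Daeho David Kaisa Oliver Sara Dan Ivar Lotte Riya Vassil Twan Ester Karolina Lena Margarita Anna Kien Klaudia Maliah Todd",
    "Oumaima Mathilde Marie Anita Ziyan Bernardo Eleanor Lorijn Maria Younes Yvan Henning Liangyu Maciej Toprak Chris GengXin Mingze Phoebe",
    "Betija Haider Kacper Sophie Amir Baltasar Isar Jelle Nicolas David Ipek Juan Marfa Maria Alissa Leopoldo Mies Jiaying Kaixin Mai Sem Tibbe",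
    "Justus Julia Philip Uli Vanessa Anna Ekaterina Thessa Tongfei Yang Benedikt Jan Nadee Osjah Tim Eliana Joana Peilin Pija Wenhao",
    "Afua Cristina Greta Jace Laura Anna Bassant Ivan Juriaan Kiavash",
    "Keitaro Nohemi Norina Yifan Yinan Luo Nikola Olesya Sophie Tom" ]

-- result = None; for lt, g in enumerate(groups, 1): if name in g.split(): result = lt
def solution_station_5_alt (name : String) : Option Int :=
  (PySem.List.enumerate groupStrings 1).foldl
    (fun result p => if (PySem.Str.split₀ p.2).contains name then some p.1 else result)
    none

-- ===== PRECONDITION & SPEC =====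
def Spec_solution_station_5 (name : String) (out : Option Int) : Prop := out = solution_station_5_alt name
instance (name : String) (out : Option Int) : Decidable (Spec_solution_station_5 name out) := by unfold Spec_solution_station_5; infer_instance

-- ===== CLAIM (what is proved, stated in full; the proofs are below) =====
def Claim_equal_solution_station_5 : Prop := ∀ (name : String), Dom_solution_station_5 name → Spec_solution_station_5 name (solution_station_5 name)

-- ===== LEMMAS AND PROOFS =====

-- splitting B's group strings recovers A's table (a closed computation)
set_option maxRecDepth 20000 in
theorem enumerate_split_eq_ltGroups :
    (PySem.List.enumerate groupStrings 1).map
      (fun p => (p.1, PySem.Str.split₀ p.2)) = ltGroups := by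
  decide

-- the value of the LAST pair of ps whose key is `name`
def lastVal (name : String) (ps : List (String × Int)) : Option Int :=
  (ps.reverse.find? (fun q => q.1 == name)).map (·.2)

theorem lastVal_append (name : String) (l₁ l₂ : List (String × Int)) :
    lastVal name (l₁ ++ l₂) = (lastVal name l₂).or (lastVal name l₁) := by
  unfold lastVal
  rw [List.reverse_append, List.find?_append]
  cases l₂.reverse.find? (fun q => q.1 == name) <;> simp [Option.or]

theorem lastVal_map (name : String) (names : List String) (lt : Int) :
    lastVal name (names.map (fun n => (n, lt))) =
      if names.contains name then some lt else none := by
  unfold lastVal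
  rw [← List.map_reverse, List.find?_map]
  by_cases h : names.contains name
  · simp only [h, if_pos]
    have h' : ∃ x ∈ names.reverse, ((fun q : String × Int => q.1 == name) ∘ (fun n => (n, lt))) x := by
      simp only [List.mem_reverse, Function.comp]
      simp only [List.contains_eq_mem, decide_eq_true_eq] at h
      exact ⟨name, h, by simp⟩
    obtain ⟨q, hq⟩ := Option.isSome_iff_exists.mp ((List.find?_isSome).2 h')
    simp [hq]
  · have h' : names.reverse.find? ((fun q : String × Int => q.1 == name) ∘ (fun n => (n, lt))) = none := by
      rw [List.find?_eq_none]
      intro x hx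
      simp only [List.mem_reverse] at hx
      simp only [Function.comp, beq_iff_eq]
      intro hxe; subst hxe
      simp [List.contains_eq_mem, hx] at h
    simp only [h', Option.map_none]
    simp only [List.contains_eq_mem] at h
    simp [h]

-- the A-side dict fold looks up to the last inserted binding of `name`
theorem get?_foldl_insert_eq_lastVal (name : String) (ps : List (String × Int))
    (d : PySem.Dict String Int) :
    (ps.foldl (fun d q => d.insert q.1 q.2) d).get? name =
      (lastVal name ps).or (d.get? name) := by
  induction ps generalizing d with
  | nil => simp [lastVal, Option.or]
  | cons a ps ih =>
      rw [List.foldl_cons, ih]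
      have : lastVal name (a :: ps) = (lastVal name ps).or (lastVal name [a]) := by
        have := lastVal_append name [a] ps
        simpa using this
      rw [this]
      rw [PySem.Dict.get?_insert]
      unfold lastVal
      by_cases hk : a.1 = name
      · cases hfind : ps.reverse.find? (fun q => q.1 == name) <;>
          simp [lastVal, hfind, hk, Option.or]
      · have hne : name ≠ a.1 := fun h => hk h.symm
        cases hfind : ps.reverse.find? (fun q => q.1 == name) <;>
          simp [lastVal, hfind, hk, hne, Option.or]

-- a last-match scan over groups also computes the last matching flattened binding
theorem foldl_scan_eq_lastVal (name : String) (gs : List (Int × List String))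
    (r : Option Int) :
    gs.foldl (fun result p => if p.2.contains name then some p.1 else result) r =
      (lastVal name (gs.flatMap (fun p => p.2.map (fun n => (n, p.1))))).or r := by
  induction gs generalizing r with
  | nil => simp [lastVal, Option.or]
  | cons g gs ih =>
      rw [List.foldl_cons, ih, List.flatMap_cons, lastVal_append, lastVal_map]
      by_cases h : g.2.contains name
      · have hm : name ∈ g.2 := by simpa [List.contains_eq_mem] using h
        cases hfind : lastVal name (gs.flatMap (fun p => p.2.map (fun n => (n, p.1)))) <;>
          simp [hm, hfind, Option.or]
      · have hm : name ∉ g.2 := by simpa [List.contains_eq_mem] using h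
        cases hfind : lastVal name (gs.flatMap (fun p => p.2.map (fun n => (n, p.1)))) <;>
          simp [hm, hfind, Option.or]

-- A's nested insert loop is the insert loop over the flattened pair list
theorem foldl_nested_eq_flat (gs : List (Int × List String)) (d : PySem.Dict String Int) :
    gs.foldl (fun d p => p.2.foldl (fun d n => d.insert n p.1) d) d =
      (gs.flatMap (fun p => p.2.map (fun n => (n, p.1)))).foldl
        (fun d q => d.insert q.1 q.2) d := by
  induction gs generalizing d with
  | nil => rfl
  | cons g gs ih =>
      rw [List.foldl_cons, ih, List.flatMap_cons, List.foldl_append, List.foldl_map]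

-- B's fold over the enumerated split strings is the scan over A's table
theorem alt_eq_scan (name : String) :
    solution_station_5_alt name =
      ltGroups.foldl (fun result p => if p.2.contains name then some p.1 else result) none := by
  unfold solution_station_5_alt
  rw [← enumerate_split_eq_ltGroups, List.foldl_map]

-- ===== VERDICT (by name: the statement is the Claim_ definition above) =====
theorem solution_station_5_spec : Claim_equal_solution_station_5 := by
  intro name _
  unfold Spec_solution_station_5 solution_station_5
  rw [alt_eq_scan, foldl_nested_eq_flat, get?_foldl_insert_eq_lastVal, foldl_scan_eq_lastVal]
  simp [PySem.Dict.get?_empty]
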